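-- pv_equiv track=rewrite | github.com/sfneal/mysql-toolkit | mysql/toolkit/components/manipulate/select.py | _like_pattern
-- ===== SOURCE A (Python) =====
-- def _like_pattern(start, end, anywhere, index, length):
--     """
--     Create a LIKE pattern to use as a search parameter for a WHERE clause.
--
--     :param start: Value to be found at the start
--     :param end: Value to be found at the end
--     :param anywhere: Value to be found anywhere
--     :param index: Value to be found at a certain index
--     :param length: Minimum character length
--     :return: WHERE pattern
--     """
--     # Unpack index tuple
--     index_num, index_char = index
--     index = None
--
--     # Start, end, anywhere
--     if all(i for i in [start, end, anywhere]) and not any(i for i in [index, length]):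
--         return '{start}%{anywhere}%{end}'.format(start=start, end=end, anywhere=anywhere)
--
--     # Start, end
--     elif all(i for i in [start, end]) and not any(i for i in [anywhere, index, length]):
--         return '{start}%{end}'.format(start=start, end=end)
--
--     # Start, anywhere
--     elif all(i for i in [start, anywhere]) and not any(i for i in [end, index, length]):
--         return '{start}%{anywhere}%'.format(start=start, anywhere=anywhere)
--
--     # End, anywhere
--     elif all(i for i in [end, anywhere]) and not any(i for i in [start, index, length]):
--         return '%{anywhere}%{end}'.format(end=end, anywhere=anywhere)
--
--     # Start
--     elif start and not any(i for i in [end, anywhere, index, length]):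
--         return '{start}%'.format(start=start)
--
--     # End
--     elif end and not any(i for i in [start, anywhere, index, length]):
--         return '%{end}'.format(end=end)
--
--     # Anywhere
--     elif anywhere and not any(i for i in [start, end, index, length]):
--         return '%{anywhere}%'.format(anywhere=anywhere)
--
--     # Index
--     elif index_num and index_char and not any(i for i in [start, end, anywhere, length]):
--         return '{index_num}{index_char}%'.format(index_num='_' * (index_num + 1), index_char=index_char)
--
--     # Length
--     elif length and not any(i for i in [start, end, anywhere, index]):
--         return '{length}'.format(length='_%' * length)
--
--     else:
--         return None
-- ===== SOURCE B (Python) =====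
-- def _like_pattern(start, end, anywhere, index, length):
--     """Build a LIKE pattern; single concatenation branch instead of
--     enumerating all seven start/end/anywhere subsets."""
--     index_num, index_char = index
--     # Any combination of start/end/anywhere (unless a length is given):
--     # the pattern is always  start? '%' (anywhere '%')? end?
--     if (start or end or anywhere) and not length:
--         mid = '%{}%'.format(anywhere) if anywhere else '%'
--         return '{}{}{}'.format(start or '', mid, end or '')
--     if index_num and index_char and not length:
--         return '{}{}%'.format('_' * (index_num + 1), index_char)
--     if length and not (start or end or anywhere):
--         return '_%' * length
--     return None
-- ===== Notes on version B (the rewrite author's own statement) =====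
-- stated objective: simpler
-- what changed: Replaces A's seven enumerated start/end/anywhere branches with a single branch that assembles the pattern by concatenation (start-or-empty + '%' + optional anywhere% + end-or-empty), keeping only the index and length branches.
import Mathlib
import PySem

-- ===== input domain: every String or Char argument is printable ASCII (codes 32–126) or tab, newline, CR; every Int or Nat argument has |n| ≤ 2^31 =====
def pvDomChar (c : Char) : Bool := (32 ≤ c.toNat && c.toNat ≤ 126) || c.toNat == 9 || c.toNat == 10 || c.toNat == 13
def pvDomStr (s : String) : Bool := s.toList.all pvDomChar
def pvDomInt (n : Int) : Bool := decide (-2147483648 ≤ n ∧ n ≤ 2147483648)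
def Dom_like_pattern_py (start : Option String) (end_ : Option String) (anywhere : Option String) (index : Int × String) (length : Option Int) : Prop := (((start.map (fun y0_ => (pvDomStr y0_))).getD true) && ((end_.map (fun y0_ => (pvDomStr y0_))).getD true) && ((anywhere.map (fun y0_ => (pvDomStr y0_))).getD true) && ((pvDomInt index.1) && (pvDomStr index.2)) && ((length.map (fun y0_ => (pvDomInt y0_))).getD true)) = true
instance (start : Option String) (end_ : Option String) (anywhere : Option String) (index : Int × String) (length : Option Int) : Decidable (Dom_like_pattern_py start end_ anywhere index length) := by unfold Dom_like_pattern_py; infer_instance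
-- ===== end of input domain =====

-- ===== PORT A =====
-- One honest line: B collapses A's seven enumerated start/end/anywhere branches into one
-- concatenation-built pattern; objective: simpler. (No mutation; return value only.)
-- Python truthiness of an Optional[str]: not None and not "".
def pvTruthyS (o : Option String) : Bool :=
  match o with
  | none => false
  | some s => !(s == "")

-- Python truthiness of an Optional[int]: not None and not 0.
def pvTruthyI (o : Option Int) : Bool :=
  match o with
  | none => false
  | some n => !(n == 0)

-- Python '"_" * n' / '"_%" * n': n copies (empty for n <= 0); exact, hand-ported.
def pvStrMul (s : String) (n : Int) : String :=
  String.ofList (List.flatten (List.replicate n.toNat s.toList))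

def like_pattern_py (start : Option String) (end_ : Option String) (anywhere : Option String) (index : Int × String) (length : Option Int) : Option String :=
  -- index_num, index_char = index; index = None (so 'index' never gates a branch below)
  let index_num : Int := index.1
  let index_char : String := index.2
  -- Start, end, anywhere
  if (pvTruthyS start && pvTruthyS end_ && pvTruthyS anywhere) && !(pvTruthyI length) then
    some (start.getD "" ++ "%" ++ anywhere.getD "" ++ "%" ++ end_.getD "")
  -- Start, end
  else if (pvTruthyS start && pvTruthyS end_) && !(pvTruthyS anywhere || pvTruthyI length) then
    some (start.getD "" ++ "%" ++ end_.getD "")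
  -- Start, anywhere
  else if (pvTruthyS start && pvTruthyS anywhere) && !(pvTruthyS end_ || pvTruthyI length) then
    some (start.getD "" ++ "%" ++ anywhere.getD "" ++ "%")
  -- End, anywhere
  else if (pvTruthyS end_ && pvTruthyS anywhere) && !(pvTruthyS start || pvTruthyI length) then
    some ("%" ++ anywhere.getD "" ++ "%" ++ end_.getD "")
  -- Start
  else if pvTruthyS start && !(pvTruthyS end_ || pvTruthyS anywhere || pvTruthyI length) then
    some (start.getD "" ++ "%")
  -- End
  else if pvTruthyS end_ && !(pvTruthyS start || pvTruthyS anywhere || pvTruthyI length) then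
    some ("%" ++ end_.getD "")
  -- Anywhere
  else if pvTruthyS anywhere && !(pvTruthyS start || pvTruthyS end_ || pvTruthyI length) then
    some ("%" ++ anywhere.getD "" ++ "%")
  -- Index
  else if (!(index_num == 0) && !(index_char == "")) && !(pvTruthyS start || pvTruthyS end_ || pvTruthyS anywhere || pvTruthyI length) then
    some (pvStrMul "_" (index_num + 1) ++ index_char ++ "%")
  -- Length
  else if pvTruthyI length && !(pvTruthyS start || pvTruthyS end_ || pvTruthyS anywhere) then
    some (pvStrMul "_%" (length.getD 0))
  else
    none

-- ===== PORT B =====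
-- Python 'x or \'\'' for an Optional[str].
def pvOrEmpty (o : Option String) : String :=
  if pvTruthyS o then o.getD "" else ""

def like_pattern_py_alt (start : Option String) (end_ : Option String) (anywhere : Option String) (index : Int × String) (length : Option Int) : Option String :=
  let index_num : Int := index.1
  let index_char : String := index.2
  if (pvTruthyS start || pvTruthyS end_ || pvTruthyS anywhere) && !(pvTruthyI length) then
    let mid : String := if pvTruthyS anywhere then "%" ++ anywhere.getD "" ++ "%" else "%"
    some (pvOrEmpty start ++ mid ++ pvOrEmpty end_)
  else if (!(index_num == 0) && !(index_char == "")) && !(pvTruthyI length) then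
    some (pvStrMul "_" (index_num + 1) ++ index_char ++ "%")
  else if pvTruthyI length && !(pvTruthyS start || pvTruthyS end_ || pvTruthyS anywhere) then
    some (pvStrMul "_%" (length.getD 0))
  else
    none

-- ===== PRECONDITION & SPEC =====
def Spec_like_pattern_py (start : Option String) (end_ : Option String) (anywhere : Option String) (index : Int × String) (length : Option Int) (out : Option String) : Prop := out = like_pattern_py_alt start end_ anywhere index length
instance (start : Option String) (end_ : Option String) (anywhere : Option String) (index : Int × String) (length : Option Int) (out : Option String) : Decidable (Spec_like_pattern_py start end_ anywhere index length out) := by unfold Spec_like_pattern_py; infer_instance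

-- ===== CLAIM (what is proved, stated in full; the proofs are below) =====
def Claim_equal_like_pattern_py : Prop := ∀ (start : Option String) (end_ : Option String) (anywhere : Option String) (index : Int × String) (length : Option Int), Dom_like_pattern_py start end_ anywhere index length → Spec_like_pattern_py start end_ anywhere index length (like_pattern_py start end_ anywhere index length)

-- ===== LEMMAS AND PROOFS =====

-- ===== VERDICT (by name: the statement is the Claim_ definition above) =====
theorem like_pattern_py_spec : Claim_equal_like_pattern_py := by
  intro start end_ anywhere index length _
  unfold Spec_like_pattern_py like_pattern_py like_pattern_py_alt pvOrEmpty
  by_cases hs : pvTruthyS start = true <;>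
  by_cases he : pvTruthyS end_ = true <;>
  by_cases ha : pvTruthyS anywhere = true <;>
  by_cases hl : pvTruthyI length = true <;>
    simp [hs, he, ha, hl, String.append_assoc]
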